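-- pv_equiv track=rewrite | github.com/qiaolunzhang/progressive-recovery | prog.py | possible_allocs
-- ===== SOURCE A (Python) =====
-- def possible_allocs(groups, total):
--     if (groups == 1):
--         return [[total]];
--     else:
--         nums = range(total + 1);
--         # looping through all values for one of the partitions.
--         container1 = [];
--         for i in nums:
--             # recursive step - generate all combinations without the first
--             # partition
--             subset = possible_allocs(groups - 1, total - i);
--             # append the first partition onto each element of this list
--             container2 = [];
--             for l in subset:
--                 container2 += [([i] + l)];
--             container1 += [container2];
--         # Flatten just takes a list of lists, and extract everything in each
--         # list and mesh everything together.
--         return [item for sublist in container1 for item in sublist];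
-- ===== SOURCE B (Python) =====
-- def possible_allocs(groups, total):
--     # Iterative prefix expansion: each state is (prefix, remaining);
--     # expand the prefix groups-1 times, then close with the remainder.
--     states = [([], total)]
--     for _ in range(groups - 1):
--         if not states:
--             break
--         states = [(p + [i], r - i) for (p, r) in states for i in range(r + 1)]
--     return [p + [r] for (p, r) in states]
-- ===== Notes on version B (the rewrite author's own statement) =====
-- stated objective: alternative
-- what changed: Replaced the recursion on groups (recompute all sub-allocations for each first part, then flatten) by a single iterative breadth-first expansion that carries (prefix, remaining) states and extends every prefix once per group.
-- outside the precondition, e.g. on possible_allocs(-1, -2): A returns [], B returns [[-2]]; on possible_allocs(0, -1): A returns [], B returns [[-1]]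
import Mathlib
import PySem

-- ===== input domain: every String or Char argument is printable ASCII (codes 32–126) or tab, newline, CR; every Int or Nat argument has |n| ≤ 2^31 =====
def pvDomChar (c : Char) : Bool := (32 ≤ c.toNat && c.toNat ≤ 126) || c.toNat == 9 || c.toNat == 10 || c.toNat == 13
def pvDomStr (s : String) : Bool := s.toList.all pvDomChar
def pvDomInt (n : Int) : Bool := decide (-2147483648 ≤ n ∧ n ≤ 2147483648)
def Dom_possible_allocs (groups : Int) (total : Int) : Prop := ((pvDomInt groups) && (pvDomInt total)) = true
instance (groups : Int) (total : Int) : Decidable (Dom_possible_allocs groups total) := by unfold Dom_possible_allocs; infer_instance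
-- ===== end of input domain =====

-- B replaces A's recursion on `groups` by one iterative (prefix, remaining)-state
-- expansion; same output, same order (objective: alternative).


-- ===== PORT A =====
-- A's recursion on `groups`, with the (positive) value of `groups` as the Nat
-- recursion argument; the unreachable case 0 (excluded by Pre_) returns [].
def possibleAllocsA : Nat → Int → List (List Int)
  | 0, _ => []
  | g + 1, total =>
    if g + 1 = 1 then [[total]]
    else
      let nums := PySem.List.pyRange 0 (total + 1) 1
      let container1 := nums.foldl (fun c1 i =>
        let subset := possibleAllocsA g (total - i)
        let container2 := subset.foldl (fun c2 l => c2 ++ [[i] ++ l]) []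
        c1 ++ [container2]) []
      container1.flatten

def possible_allocs (groups : Int) (total : Int) : List (List Int) :=
  possibleAllocsA groups.toNat total

-- ===== PORT B =====
-- B's loop `for _ in range(groups-1): if not states: break; states = …`.
def altLoop : Nat → List (List Int × Int) → List (List Int × Int)
  | 0, states => states
  | n + 1, states =>
    if states.isEmpty then states
    else altLoop n (states.flatMap (fun pr =>
      (PySem.List.pyRange 0 (pr.2 + 1) 1).map (fun i => (pr.1 ++ [i], pr.2 - i))))

def possible_allocs_alt (groups : Int) (total : Int) : List (List Int) :=
  (altLoop (groups - 1).toNat [(([] : List Int), total)]).map (fun pr => pr.1 ++ [pr.2])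

-- ===== PRECONDITION & SPEC =====
-- Pre_ restricts to the natural domain groups ≥ 1: for groups ≤ 0 A either hits
-- Python's recursion limit (total ≥ 0) or falls out of its empty range and
-- returns [] (total < 0), a value outside the function's meaning.
def Pre_possible_allocs (groups : Int) (total : Int) : Prop := 1 ≤ groups
instance (groups : Int) (total : Int) : Decidable (Pre_possible_allocs groups total) := by unfold Pre_possible_allocs; infer_instance
def pvWitness_possible_allocs : Int × Int := (3, 2)

def Spec_possible_allocs (groups : Int) (total : Int) (out : List (List Int)) : Prop := out = possible_allocs_alt groups total
instance (groups : Int) (total : Int) (out : List (List Int)) : Decidable (Spec_possible_allocs groups total out) := by unfold Spec_possible_allocs; infer_instance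

-- ===== CLAIM (what is proved, stated in full; the proofs are below) =====
def Claim_equal_possible_allocs : Prop := ∀ (groups : Int) (total : Int), Dom_possible_allocs groups total → Pre_possible_allocs groups total → Spec_possible_allocs groups total (possible_allocs groups total)

-- ===== LEMMAS AND PROOFS =====

-- B's one expansion step, named for the proofs.
def pvStep (states : List (List Int × Int)) : List (List Int × Int) :=
  states.flatMap (fun pr =>
    (PySem.List.pyRange 0 (pr.2 + 1) 1).map (fun i => (pr.1 ++ [i], pr.2 - i)))

-- B's `if not states: break` skips only steps that would be pvStep [] = [].
lemma altLoop_eq (n : Nat) : ∀ (s : List (List Int × Int)), altLoop n s = pvStep^[n] s := by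
  induction n with
  | zero => intro s; rfl
  | succ n ih =>
    intro s
    cases s with
    | nil => exact (Function.iterate_fixed rfl (n + 1)).symm
    | cons a tl =>
      show altLoop n (pvStep (a :: tl)) = _
      rw [ih, Function.iterate_succ_apply]

lemma paA_succ (g : Nat) (t : Int) :
    possibleAllocsA (g + 2) t
      = (PySem.List.pyRange 0 (t + 1) 1).flatMap
          (fun i => (possibleAllocsA (g + 1) (t - i)).map (fun l => [i] ++ l)) := by
  show (((PySem.List.pyRange 0 (t + 1) 1).foldl (fun c1 i =>
      c1 ++ [(possibleAllocsA (g + 1) (t - i)).foldl (fun c2 l => c2 ++ [[i] ++ l]) []]) []).flatten) = _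
  rw [show (fun (c1 : List (List (List Int))) (i : Int) =>
      c1 ++ [(possibleAllocsA (g + 1) (t - i)).foldl (fun c2 l => c2 ++ [[i] ++ l]) []])
    = (fun c1 i => c1 ++ [(possibleAllocsA (g + 1) (t - i)).map (fun l => [i] ++ l)]) from by
      funext c1 i; rw [PySem.List.foldl_append_singleton_eq_map]; simp]
  rw [PySem.List.foldl_append_singleton_eq_map]
  simp [List.flatMap_def]

-- Invariant of B's loop: closing the states after n expansion steps yields A's
-- allocations for n+1 groups, each prefixed by the state's prefix.
lemma step_iter_close (n : Nat) :
    ∀ (xs : List (List Int × Int)),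
      (pvStep^[n] xs).map (fun pr => pr.1 ++ [pr.2])
        = xs.flatMap (fun pr => (possibleAllocsA (n + 1) pr.2).map (fun l => pr.1 ++ l)) := by
  induction n with
  | zero =>
    intro xs
    simp [possibleAllocsA, List.map_eq_flatMap]
  | succ n ih =>
    intro xs
    rw [Function.iterate_succ_apply, ih]
    unfold pvStep
    rw [List.flatMap_assoc]
    apply List.flatMap_congr   -- pointwise equality of the two flatMap bodies
    intro pr _
    rw [List.flatMap_map, show n + 1 + 1 = n + 2 from rfl, paA_succ]
    rw [List.map_flatMap]
    apply List.flatMap_congr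
    intro i _
    simp [List.map_map, Function.comp_def, List.append_assoc]

-- ===== VERDICT (by name: the statement is the Claim_ definition above) =====
theorem possible_allocs_spec : Claim_equal_possible_allocs := by
  intro groups total _ hpre
  show possible_allocs groups total = possible_allocs_alt groups total
  unfold possible_allocs possible_allocs_alt
  have h : (groups - 1).toNat + 1 = groups.toNat := by
    unfold Pre_possible_allocs at hpre; omega
  rw [altLoop_eq, step_iter_close, h]
  simp
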